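-- pv_equiv track=rewrite | github.com/gabsgj/XENIA | backend/app/services/resources.py | _determine_subject_category
-- ===== SOURCE A (Python) =====
-- SUBJECT_RESOURCES = {
--     "mathematics": [
--         {"name": "Wolfram MathWorld", "url": "https://mathworld.wolfram.com", "quality": 9, "description": "Comprehensive mathematical encyclopedia"},
--         {"name": "Paul's Online Math Notes", "url": "https://tutorial.math.lamar.edu", "quality": 8, "description": "Free calculus and algebra tutorials"},
--         {"name": "3Blue1Brown", "url": "https://www.3blue1brown.com", "quality": 9, "description": "Visual mathematics explanations"},
--         {"name": "Desmos Calculator", "url": "https://www.desmos.com/calculator", "quality": 8, "description": "Interactive graphing calculator"},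
--         {"name": "Khan Academy Math", "url": "https://www.khanacademy.org/math", "quality": 9, "description": "Free math courses from basic to advanced"},
--         {"name": "Brilliant Math", "url": "https://brilliant.org/courses/mathematics/", "quality": 8, "description": "Interactive math problem solving"},
--         {"name": "Mathway", "url": "https://www.mathway.com", "quality": 7, "description": "Step-by-step math problem solver"},
--     ],
--     "programming": [
--         {"name": "LeetCode", "url": "https://leetcode.com", "quality": 9, "description": "Coding interview preparation platform"},
--         {"name": "HackerRank", "url": "https://www.hackerrank.com", "quality": 8, "description": "Coding challenges and skill assessment"},
--         {"name": "freeCodeCamp", "url": "https://www.freecodecamp.org", "quality": 9, "description": "Free coding bootcamp with certifications"},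
--         {"name": "Codecademy", "url": "https://www.codecademy.com", "quality": 8, "description": "Interactive coding lessons"},
--         {"name": "Replit", "url": "https://replit.com", "quality": 7, "description": "Online IDE for coding practice"},
--         {"name": "CodePen", "url": "https://codepen.io", "quality": 7, "description": "Front-end code playground"},
--         {"name": "GitHub Learning Lab", "url": "https://lab.github.com", "quality": 8, "description": "Interactive GitHub learning courses"},
--         {"name": "Exercism", "url": "https://exercism.org", "quality": 8, "description": "Mentored coding exercises in 50+ languages"},
--     ],
--     "science": [
--         {"name": "Khan Academy Science", "url": "https://www.khanacademy.org/science", "quality": 9, "description": "Comprehensive science education"},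
--         {"name": "Crash Course", "url": "https://www.youtube.com/c/crashcourse", "quality": 9, "description": "Fast-paced science video series"},
--         {"name": "SciShow", "url": "https://www.youtube.com/c/scishow", "quality": 8, "description": "Science news and explanations"},
--         {"name": "National Geographic", "url": "https://www.nationalgeographic.com", "quality": 8, "description": "Science and nature documentaries"},
--         {"name": "PhET Interactive Simulations", "url": "https://phet.colorado.edu", "quality": 9, "description": "Interactive physics and chemistry simulations"},
--         {"name": "BioInteractive", "url": "https://www.biointeractive.org", "quality": 8, "description": "Biology teaching resources from HHMI"},
--         {"name": "NASA Education", "url": "https://www.nasa.gov/audience/foreducators", "quality": 8, "description": "Space science and STEM resources"},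
--     ],
--     "language": [
--         {"name": "Duolingo", "url": "https://www.duolingo.com", "quality": 9, "description": "Gamified language learning platform"},
--         {"name": "Memrise", "url": "https://www.memrise.com", "quality": 8, "description": "Spaced repetition language learning"},
--         {"name": "BBC Languages", "url": "https://www.bbc.co.uk/languages", "quality": 7, "description": "Free language learning courses"},
--         {"name": "SparkNotes Literature", "url": "https://www.sparknotes.com/lit", "quality": 7, "description": "Literature study guides and analysis"},
--         {"name": "Grammar Girl", "url": "https://www.quickanddirtytips.com/grammar-girl", "quality": 7, "description": "Grammar and writing tips podcast"},
--         {"name": "Purdue OWL", "url": "https://owl.purdue.edu", "quality": 8, "description": "Online writing lab and grammar resources"},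
--         {"name": "Merriam-Webster", "url": "https://www.merriam-webster.com", "quality": 8, "description": "Dictionary and thesaurus with word games"},
--     ],
--     "business": [
--         {"name": "Khan Academy Business", "url": "https://www.khanacademy.org/economics-finance-domain", "quality": 8, "description": "Business and economics education"},
--         {"name": "Coursera Business", "url": "https://www.coursera.org/browse/business", "quality": 8, "description": "Business courses from top universities"},
--         {"name": "edX Business", "url": "https://www.edx.org/learn/business", "quality": 8, "description": "Business and management courses"},
--         {"name": "Investopedia", "url": "https://www.investopedia.com", "quality": 8, "description": "Financial education and market analysis"},
--     ],
--     "history": [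
--         {"name": "Khan Academy History", "url": "https://www.khanacademy.org/humanities", "quality": 8, "description": "World history and humanities"},
--         {"name": "Crash Course History", "url": "https://www.youtube.com/playlist?list=PL8dPuuaLjXtNjasccl-WajpONGX3zoY4", "quality": 8, "description": "World history video series"},
--         {"name": "BBC History", "url": "https://www.bbc.co.uk/history", "quality": 7, "description": "Historical documentaries and articles"},
--     ],
--     "art": [
--         {"name": "Khan Academy Art", "url": "https://www.khanacademy.org/humanities/art-history", "quality": 8, "description": "Art history and appreciation"},
--         {"name": "The Metropolitan Museum of Art", "url": "https://www.metmuseum.org/learn", "quality": 8, "description": "Art education resources"},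
--         {"name": "Smarthistory", "url": "https://smarthistory.org", "quality": 8, "description": "Art history teaching resources"},
--     ]
-- }
--
-- def _determine_subject_category(topic: str, category: str) -> str:
--     """Determine the broad subject category for specialized resource selection."""
--     topic_lower = topic.lower()
--
--     # Programming/CS terms
--     if any(term in topic_lower for term in ["programming", "code", "algorithm", "data structure", "software", "web", "api", "javascript", "python", "java", "css", "html"]):
--         return "programming"
--
--     # Mathematics terms
--     if any(term in topic_lower for term in ["math", "algebra", "calculus", "geometry", "statistics", "equation", "formula", "theorem", "proof"]):
--         return "mathematics"
--
--     # Science terms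
--     if any(term in topic_lower for term in ["physics", "chemistry", "biology", "science", "experiment", "theory", "hypothesis"]):
--         return "science"
--
--     # Language terms
--     if any(term in topic_lower for term in ["english", "literature", "writing", "grammar", "language", "essay", "reading"]):
--         return "language"
--
--     # Use provided category as fallback
--     return category if category in SUBJECT_RESOURCES else "general"
-- ===== SOURCE B (Python) =====
-- # B: position-driven scan — walk every start position of the lowered topic once, match keywords by
-- # startswith at that position via a keyword->priority dict, and keep the minimum priority seen;
-- # structurally different from A's per-keyword substring cascade.
-- _CATEGORY_ORDER = ["programming", "mathematics", "science", "language"]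
-- _KEYWORD_PRIORITY = {
--     "programming": 0, "code": 0, "algorithm": 0, "data structure": 0, "software": 0,
--     "web": 0, "api": 0, "javascript": 0, "python": 0, "java": 0, "css": 0, "html": 0,
--     "math": 1, "algebra": 1, "calculus": 1, "geometry": 1, "statistics": 1,
--     "equation": 1, "formula": 1, "theorem": 1, "proof": 1,
--     "physics": 2, "chemistry": 2, "biology": 2, "science": 2, "experiment": 2,
--     "theory": 2, "hypothesis": 2,
--     "english": 3, "literature": 3, "writing": 3, "grammar": 3, "language": 3,
--     "essay": 3, "reading": 3,
-- }
-- _KNOWN_SUBJECTS = ["mathematics", "programming", "science", "language", "business", "history", "art"]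
--
-- def _determine_subject_category(topic: str, category: str) -> str:
--     t = topic.lower()
--     best = None
--     for i in range(len(t)):
--         for kw, pri in _KEYWORD_PRIORITY.items():
--             if (best is None or pri < best) and t.startswith(kw, i):
--                 best = pri
--     if best is not None:
--         return _CATEGORY_ORDER[best]
--     return category if category in _KNOWN_SUBJECTS else "general"
-- ===== Notes on version B (the rewrite author's own statement) =====
-- stated objective: alternative
-- what changed: Replaced A's ordered per-keyword substring cascade by a position-driven scan: one pass over every start index of the lowered topic, matching keywords via startswith against a keyword->priority dict and keeping the minimum priority, with the category name recovered by index at the end.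
import Mathlib
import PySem

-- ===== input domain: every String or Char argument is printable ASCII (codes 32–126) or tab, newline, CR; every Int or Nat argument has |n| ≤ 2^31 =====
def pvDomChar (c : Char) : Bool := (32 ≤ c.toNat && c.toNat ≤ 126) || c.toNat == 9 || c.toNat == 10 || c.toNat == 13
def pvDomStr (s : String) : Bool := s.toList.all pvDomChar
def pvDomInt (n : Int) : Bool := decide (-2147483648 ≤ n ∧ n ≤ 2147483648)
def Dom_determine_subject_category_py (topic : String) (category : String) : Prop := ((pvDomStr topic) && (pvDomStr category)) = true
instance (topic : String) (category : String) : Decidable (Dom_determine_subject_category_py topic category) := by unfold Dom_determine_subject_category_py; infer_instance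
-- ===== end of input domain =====

-- B replaces A's ordered per-keyword substring cascade by a single position-driven scan of the
-- lowered topic that keeps the minimum priority of any keyword starting at a position; objective:
-- alternative decomposition (no speed claim).

-- ===== PORT A =====
def determine_subject_category_py (topic : String) (category : String) : String :=
  let topic_lower := PySem.Str.lower topic
  if (["programming", "code", "algorithm", "data structure", "software", "web", "api", "javascript", "python", "java", "css", "html"].any (fun term => PySem.Str.isIn term topic_lower)) then "programming"
  else if (["math", "algebra", "calculus", "geometry", "statistics", "equation", "formula", "theorem", "proof"].any (fun term => PySem.Str.isIn term topic_lower)) then "mathematics"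
  else if (["physics", "chemistry", "biology", "science", "experiment", "theory", "hypothesis"].any (fun term => PySem.Str.isIn term topic_lower)) then "science"
  else if (["english", "literature", "writing", "grammar", "language", "essay", "reading"].any (fun term => PySem.Str.isIn term topic_lower)) then "language"
  -- 'category in SUBJECT_RESOURCES' = membership in the dict's keys, in insertion order
  else if (["mathematics", "programming", "science", "language", "business", "history", "art"].contains category) then category
  else "general"

-- ===== PORT B =====
def pvCategoryOrder : List String := ["programming", "mathematics", "science", "language"]

-- the keyword -> priority dict, iterated in insertion order
def pvKeywordPriority : List (String × Nat) :=
  [("programming", 0), ("code", 0), ("algorithm", 0), ("data structure", 0), ("software", 0),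
   ("web", 0), ("api", 0), ("javascript", 0), ("python", 0), ("java", 0), ("css", 0), ("html", 0),
   ("math", 1), ("algebra", 1), ("calculus", 1), ("geometry", 1), ("statistics", 1),
   ("equation", 1), ("formula", 1), ("theorem", 1), ("proof", 1),
   ("physics", 2), ("chemistry", 2), ("biology", 2), ("science", 2), ("experiment", 2),
   ("theory", 2), ("hypothesis", 2),
   ("english", 3), ("literature", 3), ("writing", 3), ("grammar", 3), ("language", 3),
   ("essay", 3), ("reading", 3)]

def pvKnownSubjects : List String :=
  ["mathematics", "programming", "science", "language", "business", "history", "art"]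

def determine_subject_category_py_alt (topic : String) (category : String) : String :=
  let t := PySem.Str.lower topic
  -- t.startswith(kw, i) for i from range(len(t)) (so 0 ≤ i): exactly 'kw is a prefix of t[i:]'
  let best : Option Nat :=
    (PySem.List.pyRange 0 (PySem.Str.len t) 1).foldl
      (fun best i =>
        pvKeywordPriority.foldl
          (fun best kp =>
            if (match best with | none => true | some b => decide (kp.2 < b)) &&
               PySem.Chars.startswith (t.toList.drop i.toNat) kp.1.toList
            then some kp.2 else best)
          best)
      none
  match best with
  | some b =>
      -- _CATEGORY_ORDER[best]; best < 4 always, so the IndexError branch (none) is unreachable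
      (PySem.List.pyGet? pvCategoryOrder (b : Int)).getD "general"
  | none => if pvKnownSubjects.contains category then category else "general"

-- ===== PRECONDITION & SPEC =====
def Spec_determine_subject_category_py (topic : String) (category : String) (out : String) : Prop := out = determine_subject_category_py_alt topic category
instance (topic : String) (category : String) (out : String) : Decidable (Spec_determine_subject_category_py topic category out) := by unfold Spec_determine_subject_category_py; infer_instance

-- ===== CLAIM (what is proved, stated in full; the proofs are below) =====
def Claim_equal_determine_subject_category_py : Prop := ∀ (topic : String) (category : String), Dom_determine_subject_category_py topic category → Spec_determine_subject_category_py topic category (determine_subject_category_py topic category)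

-- ===== LEMMAS AND PROOFS =====

-- the minimum-keeping update B performs when a keyword matches
def pvStep (b : Option Nat) (p : Nat) : Option Nat :=
  if (match b with | none => true | some x => decide (p < x)) then some p else b

lemma pvStep_some (x p : Nat) : pvStep (some x) p = some (min x p) := by
  unfold pvStep
  by_cases h : p < x <;> simp [h] <;> omega

lemma pvFoldl_step_some (P : List Nat) : ∀ x, P.foldl pvStep (some x) = some (P.foldl min x) := by
  induction P with
  | nil => intro x; rfl
  | cons p ps ih => intro x; simp [List.foldl, pvStep_some, ih]

lemma pvFoldl_step_none (P : List Nat) : P.foldl pvStep none = P.min? := by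
  cases P with
  | nil => rfl
  | cons p ps =>
    have : pvStep none p = some p := by unfold pvStep; simp
    simp [List.foldl, this, pvFoldl_step_some, List.min?]

-- the inner keyword loop is pvStep folded over the priorities of the matching keywords
lemma pvInner_eq (cond : String → Bool) :
    ∀ (l : List (String × Nat)) (b : Option Nat),
      l.foldl (fun best kp =>
          if (match best with | none => true | some x => decide (kp.2 < x)) && cond kp.1
          then some kp.2 else best) b
      = ((l.filter (fun kp => cond kp.1)).map (·.2)).foldl pvStep b := by
  intro l
  induction l with
  | nil => intro b; rfl
  | cons kp l ih =>
    intro b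
    by_cases h : cond kp.1 = true
    · have h1 : (if (match b with | none => true | some x => decide (kp.2 < x)) && cond kp.1
          then some kp.2 else b) = pvStep b kp.2 := by
        unfold pvStep; cases b <;> simp [h]
      rw [List.foldl_cons, h1, ih]
      simp [h]
    · have h0 : cond kp.1 = false := by simpa using h
      have h1 : (if (match b with | none => true | some x => decide (kp.2 < x)) && cond kp.1
          then some kp.2 else b) = b := by
        cases b <;> simp [h0]
      rw [List.foldl_cons, h1, ih]
      simp [h0]

-- the whole nested loop is pvStep folded over the flat list of all matched priorities
lemma pvNested_eq (cond : Int → String → Bool) (R : List Int) :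
    ∀ (b : Option Nat),
      R.foldl (fun best i =>
        pvKeywordPriority.foldl (fun best kp =>
          if (match best with | none => true | some x => decide (kp.2 < x)) && cond i kp.1
          then some kp.2 else best) best) b
      = (R.flatMap (fun i => (pvKeywordPriority.filter (fun kp => cond i kp.1)).map (·.2))).foldl pvStep b := by
  induction R with
  | nil => intro b; rfl
  | cons i R ih =>
    intro b
    simp only [List.foldl, List.flatMap_cons, List.foldl_append]
    rw [pvInner_eq, ih]

-- membership in the matched-priority list, p fixed
lemma pvMem_matched (cond : Int → String → Bool) (R : List Int) (p : Nat) :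
    p ∈ R.flatMap (fun i => (pvKeywordPriority.filter (fun kp => cond i kp.1)).map (·.2))
    ↔ ∃ i ∈ R, ∃ kp ∈ pvKeywordPriority, cond i kp.1 = true ∧ kp.2 = p := by
  simp only [List.mem_flatMap, List.mem_map, List.mem_filter]
  tauto

-- a nonempty keyword occurs in s iff it starts at some scanned position
lemma pvExists_pos (s : List Char) (kw : List Char) (hkw : kw ≠ []) :
    (∃ i ∈ PySem.List.pyRange 0 (s.length) 1, PySem.Chars.startswith (s.drop i.toNat) kw = true)
    ↔ PySem.Chars.isIn kw s = true := by
  rw [← PySem.Chars.exists_prefix_drop_iff_isIn]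
  constructor
  · rintro ⟨i, hi, hsw⟩
    rw [PySem.List.mem_pyRange_one] at hi
    exact ⟨i.toNat, (PySem.Chars.startswith_iff _ _).1 hsw⟩
  · rintro ⟨j, hj⟩
    by_cases hlt : j < s.length
    · refine ⟨(j : Int), ?_, ?_⟩
      · rw [PySem.List.mem_pyRange_one]; constructor <;> [positivity; exact_mod_cast hlt]
      · rw [PySem.Chars.startswith_iff]; simpa using hj
    · exfalso
      have : s.drop j = [] := List.drop_eq_nil_of_le (by omega)
      rw [this, List.prefix_nil] at hj
      exact hkw hj

lemma pvFoldl_min_le_init (l : List Nat) : ∀ x : Nat, l.foldl min x ≤ x := by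
  induction l with
  | nil => intro x; simp
  | cons a l ih => intro x; exact le_trans (ih _) (min_le_left _ _)

lemma pvMin?_mem' {l : List Nat} {m : Nat} (h : l.min? = some m) : m ∈ l :=
  List.min?_mem h

lemma pvFoldl_min_le_mem (l : List Nat) : ∀ (x p : Nat), p ∈ l → l.foldl min x ≤ p := by
  induction l with
  | nil => intro x p hp; simp at hp
  | cons a l ih =>
    intro x p hp
    rcases List.mem_cons.1 hp with rfl | hp
    · simp only [List.foldl_cons]
      exact le_trans (pvFoldl_min_le_init l (min x p)) (min_le_right x p)
    · simp only [List.foldl_cons]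
      exact ih _ _ hp

lemma pvMin?_le {l : List Nat} {m p : Nat} (h : l.min? = some m) (hp : p ∈ l) : m ≤ p := by
  cases l with
  | nil => simp at hp
  | cons a l =>
    have hm : m = l.foldl min a := by
      simp [List.min?] at h; omega
    subst hm
    rcases List.mem_cons.1 hp with rfl | hp
    · exact pvFoldl_min_le_init _ _
    · exact pvFoldl_min_le_mem _ _ _ hp

-- keyword occurrence, on the String side with the port's range bound
lemma pvKw_pos (t : String) (kw : String) (h : kw.toList ≠ []) :
    (∃ i ∈ PySem.List.pyRange 0 (PySem.Str.len t) 1,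
        PySem.Chars.startswith (t.toList.drop i.toNat) kw.toList = true)
    ↔ PySem.Str.isIn kw t = true := by
  have hlen : (PySem.Str.len t) = ((t.toList.length : Nat) : Int) := by
    simp
  rw [hlen, pvExists_pos _ _ h]
  simp [PySem.Str.isIn]

def pvP (t : String) : List Nat :=
  (PySem.List.pyRange 0 (PySem.Str.len t) 1).flatMap
    (fun i => (pvKeywordPriority.filter
        (fun kp => PySem.Chars.startswith (t.toList.drop i.toNat) kp.1.toList)).map (·.2))

lemma pvMemP (t : String) (p : Nat) :
    p ∈ pvP t
    ↔ ((pvKeywordPriority.filter (fun kp => kp.2 == p)).map (·.1)).any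
        (fun kw => PySem.Str.isIn kw t) = true := by
  have hne : ∀ kp ∈ pvKeywordPriority, kp.1.toList ≠ [] := by decide
  rw [pvP, pvMem_matched (fun i kw => PySem.Chars.startswith (t.toList.drop i.toNat) kw.toList)]
  rw [List.any_eq_true]
  constructor
  · rintro ⟨i, hi, kp, hkp, hc, hp⟩
    refine ⟨kp.1, ?_, ?_⟩
    · exact List.mem_map.2 ⟨kp, List.mem_filter.2 ⟨hkp, by simp [hp]⟩, rfl⟩
    · exact (pvKw_pos t kp.1 (hne kp hkp)).1 ⟨i, hi, hc⟩
  · rintro ⟨kw, hkw, hin⟩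
    obtain ⟨kp, hf, rfl⟩ := List.mem_map.1 hkw
    obtain ⟨hkp, hp⟩ := List.mem_filter.1 hf
    obtain ⟨i, hi, hc⟩ := (pvKw_pos t kp.1 (hne kp hkp)).2 hin
    exact ⟨i, hi, kp, hkp, hc, by simpa using hp⟩

lemma pvP_vals (t : String) : ∀ p ∈ pvP t, p < 4 := by
  intro p hp
  rw [pvP, pvMem_matched (fun i kw => PySem.Chars.startswith (t.toList.drop i.toNat) kw.toList)] at hp
  obtain ⟨i, _, kp, hkp, _, hp⟩ := hp
  have h4 : ∀ kp ∈ pvKeywordPriority, kp.2 < 4 := by decide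
  have := h4 kp hkp
  omega

lemma pvBest_eq (t : String) :
    (PySem.List.pyRange 0 (PySem.Str.len t) 1).foldl
      (fun best i => pvKeywordPriority.foldl (fun best kp =>
        if (match best with | none => true | some b => decide (kp.2 < b)) &&
           PySem.Chars.startswith (t.toList.drop i.toNat) kp.1.toList
        then some kp.2 else best) best) none = (pvP t).min? := by
  rw [pvNested_eq (fun i kw => PySem.Chars.startswith (t.toList.drop i.toNat) kw.toList),
    pvFoldl_step_none]
  rfl

lemma pvG0 : ((pvKeywordPriority.filter (fun kp => kp.2 == 0)).map (·.1))
    = ["programming", "code", "algorithm", "data structure", "software", "web", "api", "javascript", "python", "java", "css", "html"] := by decide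

lemma pvG1 : ((pvKeywordPriority.filter (fun kp => kp.2 == 1)).map (·.1))
    = ["math", "algebra", "calculus", "geometry", "statistics", "equation", "formula", "theorem", "proof"] := by decide

lemma pvG2 : ((pvKeywordPriority.filter (fun kp => kp.2 == 2)).map (·.1))
    = ["physics", "chemistry", "biology", "science", "experiment", "theory", "hypothesis"] := by decide

lemma pvG3 : ((pvKeywordPriority.filter (fun kp => kp.2 == 3)).map (·.1))
    = ["english", "literature", "writing", "grammar", "language", "essay", "reading"] := by decide

-- ===== VERDICT (by name: the statement is the Claim_ definition above) =====
theorem determine_subject_category_py_spec : Claim_equal_determine_subject_category_py := by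
  intro topic category _
  unfold Spec_determine_subject_category_py determine_subject_category_py determine_subject_category_py_alt
  dsimp only
  rw [pvBest_eq (PySem.Str.lower topic)]
  set t := PySem.Str.lower topic with ht
  have e0 : 0 ∈ pvP t ↔ (["programming", "code", "algorithm", "data structure", "software", "web", "api", "javascript", "python", "java", "css", "html"].any (fun term => PySem.Str.isIn term t)) = true := by
    rw [pvMemP t 0, pvG0]
  have e1 : 1 ∈ pvP t ↔ (["math", "algebra", "calculus", "geometry", "statistics", "equation", "formula", "theorem", "proof"].any (fun term => PySem.Str.isIn term t)) = true := by
    rw [pvMemP t 1, pvG1]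
  have e2 : 2 ∈ pvP t ↔ (["physics", "chemistry", "biology", "science", "experiment", "theory", "hypothesis"].any (fun term => PySem.Str.isIn term t)) = true := by
    rw [pvMemP t 2, pvG2]
  have e3 : 3 ∈ pvP t ↔ (["english", "literature", "writing", "grammar", "language", "essay", "reading"].any (fun term => PySem.Str.isIn term t)) = true := by
    rw [pvMemP t 3, pvG3]
  by_cases h1 : 0 ∈ pvP t
  · have hc1 := e0.1 h1
    cases hm : (pvP t).min? with
    | none => exact absurd (List.min?_eq_none_iff.1 hm ▸ h1) (List.not_mem_nil)
    | some m =>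
      have hle : m ≤ 0 := pvMin?_le hm h1
      have hm0 : m = 0 := by omega
      subst hm0
      rw [if_pos hc1]; rfl
  · have hc1 : (["programming", "code", "algorithm", "data structure", "software", "web", "api", "javascript", "python", "java", "css", "html"].any (fun term => PySem.Str.isIn term t)) = false := by
      rw [← Bool.not_eq_true, ← e0]; exact h1
    by_cases h2 : 1 ∈ pvP t
    · have hc2 := e1.1 h2
      cases hm : (pvP t).min? with
      | none => exact absurd (List.min?_eq_none_iff.1 hm ▸ h2) (List.not_mem_nil)
      | some m =>
        have hle : m ≤ 1 := pvMin?_le hm h2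
        have hmem := pvMin?_mem' hm
        have hm0 : m ≠ 0 := fun h => h1 (h ▸ hmem)
        have hmv : m = 1 := by omega
        subst hmv
        rw [if_neg (by rw [hc1]; simp), if_pos hc2]; rfl
    · have hc2 : (["math", "algebra", "calculus", "geometry", "statistics", "equation", "formula", "theorem", "proof"].any (fun term => PySem.Str.isIn term t)) = false := by
        rw [← Bool.not_eq_true, ← e1]; exact h2
      by_cases h3 : 2 ∈ pvP t
      · have hc3 := e2.1 h3
        cases hm : (pvP t).min? with
        | none => exact absurd (List.min?_eq_none_iff.1 hm ▸ h3) (List.not_mem_nil)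
        | some m =>
          have hle : m ≤ 2 := pvMin?_le hm h3
          have hmem := pvMin?_mem' hm
          have hm0 : m ≠ 0 := fun h => h1 (h ▸ hmem)
          have hm1 : m ≠ 1 := fun h => h2 (h ▸ hmem)
          have hmv : m = 2 := by omega
          subst hmv
          rw [if_neg (by rw [hc1]; simp), if_neg (by rw [hc2]; simp), if_pos hc3]; rfl
      · have hc3 : (["physics", "chemistry", "biology", "science", "experiment", "theory", "hypothesis"].any (fun term => PySem.Str.isIn term t)) = false := by
          rw [← Bool.not_eq_true, ← e2]; exact h3
        by_cases h4 : 3 ∈ pvP t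
        · have hc4 := e3.1 h4
          cases hm : (pvP t).min? with
          | none => exact absurd (List.min?_eq_none_iff.1 hm ▸ h4) (List.not_mem_nil)
          | some m =>
            have hle : m ≤ 3 := pvMin?_le hm h4
            have hmem := pvMin?_mem' hm
            have hm0 : m ≠ 0 := fun h => h1 (h ▸ hmem)
            have hm1 : m ≠ 1 := fun h => h2 (h ▸ hmem)
            have hm2 : m ≠ 2 := fun h => h3 (h ▸ hmem)
            have hmv : m = 3 := by omega
            subst hmv
            rw [if_neg (by rw [hc1]; simp), if_neg (by rw [hc2]; simp), if_neg (by rw [hc3]; simp), if_pos hc4]; rfl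
        · have hc4 : (["english", "literature", "writing", "grammar", "language", "essay", "reading"].any (fun term => PySem.Str.isIn term t)) = false := by
            rw [← Bool.not_eq_true, ← e3]; exact h4
          have hnil : pvP t = [] := by
            rw [List.eq_nil_iff_forall_not_mem]
            intro p hp
            have h4' := pvP_vals t p hp
            interval_cases p <;> [exact h1 hp; exact h2 hp; exact h3 hp; exact h4 hp]
          rw [hnil]
          rw [if_neg (by rw [hc1]; simp), if_neg (by rw [hc2]; simp), if_neg (by rw [hc3]; simp), if_neg (by rw [hc4]; simp)]
          rfl
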